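-- pv_equiv track=rewrite | github.com/Dospacite/PatchesPuzzleGenerator | src/patches_puzzle_creator/generate_patches.py | has_isolated_empty_cell
-- ===== SOURCE A (Python) =====
-- def has_isolated_empty_cell(rows: int, cols: int, grid: list[list[int]]) -> bool:
--     for row in range(rows):
--         for col in range(cols):
--             if grid[row][col] != -1:
--                 continue
--             degree = 0
--             for d_row, d_col in ((1, 0), (-1, 0), (0, 1), (0, -1)):
--                 next_row = row + d_row
--                 next_col = col + d_col
--                 if 0 <= next_row < rows and 0 <= next_col < cols and grid[next_row][next_col] == -1:
--                     degree += 1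
--             if degree == 0:
--                 return True
--     return False
-- ===== SOURCE B (Python) =====
-- def has_isolated_empty_cell(rows: int, cols: int, grid: list[list[int]]) -> bool:
--     # Pass 1: mark every empty cell that participates in an empty-empty
--     # orthogonal pair, by looking only at right/down neighbours of each cell.
--     marked = set()
--     for row in range(rows):
--         for col in range(cols):
--             if grid[row][col] == -1:
--                 if row + 1 < rows and grid[row + 1][col] == -1:
--                     marked.add((row, col))
--                     marked.add((row + 1, col))
--                 if col + 1 < cols and grid[row][col + 1] == -1:
--                     marked.add((row, col))
--                     marked.add((row, col + 1))
--     # Pass 2: an isolated empty cell is an empty cell never marked.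
--     for row in range(rows):
--         for col in range(cols):
--             if grid[row][col] == -1 and (row, col) not in marked:
--                 return True
--     return False
-- ===== Notes on version B (the rewrite author's own statement) =====
-- stated objective: alternative
-- what changed: Replaces the fused per-cell 4-neighbour degree count with a global two-pass scheme: one pass marks both cells of every empty-empty right/down adjacent pair in a set, a second pass returns True at the first empty cell that was never marked.
-- outside the precondition, e.g. on has_isolated_empty_cell(3, 1, [[-1], [0], []]): A returns True, B raises IndexError
import Mathlib
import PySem

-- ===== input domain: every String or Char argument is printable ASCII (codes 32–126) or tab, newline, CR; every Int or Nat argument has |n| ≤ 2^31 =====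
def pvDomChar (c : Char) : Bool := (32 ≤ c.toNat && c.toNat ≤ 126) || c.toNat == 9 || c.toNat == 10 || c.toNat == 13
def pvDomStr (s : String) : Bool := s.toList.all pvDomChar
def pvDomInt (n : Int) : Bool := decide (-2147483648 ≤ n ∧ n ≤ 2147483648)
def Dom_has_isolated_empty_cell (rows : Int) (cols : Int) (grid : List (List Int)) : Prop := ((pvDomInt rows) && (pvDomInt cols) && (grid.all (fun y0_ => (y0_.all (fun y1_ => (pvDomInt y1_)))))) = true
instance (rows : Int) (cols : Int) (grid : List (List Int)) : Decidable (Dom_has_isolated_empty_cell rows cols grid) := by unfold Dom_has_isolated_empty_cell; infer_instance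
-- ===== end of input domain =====

-- B replaces A's fused per-cell 4-neighbour degree count by a two-pass scheme
-- (mark both cells of every empty-empty right/down pair, then look for an
-- unmarked empty cell); same cost, different decomposition (objective: alternative).

-- ===== PORT A =====
-- grid[r][c]; Pre_ guarantees the indices are in range, so the defaults are never read
def pvCell (grid : List (List Int)) (r c : Int) : Int :=
  (PySem.List.pyGet? ((PySem.List.pyGet? grid r).getD []) c).getD 0

def pvDeg (rows cols : Int) (grid : List (List Int)) (row col : Int) : Int :=
  [((1:Int),(0:Int)), (-1,0), (0,1), (0,-1)].foldl (fun degree d =>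
    let nr := row + d.1
    let nc := col + d.2
    if 0 ≤ nr ∧ nr < rows ∧ 0 ≤ nc ∧ nc < cols ∧ pvCell grid nr nc = -1
    then degree + 1 else degree) 0

def has_isolated_empty_cell (rows : Int) (cols : Int) (grid : List (List Int)) : Bool :=
  (PySem.List.pyRange 0 rows 1).any fun row =>
    (PySem.List.pyRange 0 cols 1).any fun col =>
      if pvCell grid row col ≠ -1 then false
      else decide (pvDeg rows cols grid row col = 0)

-- ===== PORT B =====
def pvMarkCell (rows cols : Int) (grid : List (List Int)) (row : Int)
    (m : PySem.Set (Int × Int)) (col : Int) : PySem.Set (Int × Int) :=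
  if pvCell grid row col = -1 then
    let m :=
      if row + 1 < rows ∧ pvCell grid (row + 1) col = -1 then
        PySem.Set.add (PySem.Set.add m (row, col)) (row + 1, col)
      else m
    if col + 1 < cols ∧ pvCell grid row (col + 1) = -1 then
      PySem.Set.add (PySem.Set.add m (row, col)) (row, col + 1)
    else m
  else m

def pvMarked (rows cols : Int) (grid : List (List Int)) : PySem.Set (Int × Int) :=
  (PySem.List.pyRange 0 rows 1).foldl (fun m row =>
    (PySem.List.pyRange 0 cols 1).foldl (pvMarkCell rows cols grid row) m)
    PySem.Set.empty

def has_isolated_empty_cell_alt (rows : Int) (cols : Int) (grid : List (List Int)) : Bool :=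
  let marked := pvMarked rows cols grid
  (PySem.List.pyRange 0 rows 1).any fun row =>
    (PySem.List.pyRange 0 cols 1).any fun col =>
      decide (pvCell grid row col = -1) && !(PySem.Set.contains marked (row, col))

-- ===== PRECONDITION & SPEC =====
-- Pre_ excludes exactly the grids on which an iteration of the Python programs
-- indexes outside the actual grid (IndexError): unless cols ≤ 0, the first
-- `rows` rows must exist and each have at least `cols` entries.  This slightly
-- narrows A's domain: A can return True early, before ever touching a later
-- malformed row on which B's full marking pass raises (see the cited example).
def Pre_has_isolated_empty_cell (rows : Int) (cols : Int) (grid : List (List Int)) : Prop :=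
  cols ≤ 0 ∨ (rows ≤ (grid.length : Int) ∧
    ∀ r ∈ grid.take rows.toNat, cols ≤ (r.length : Int))
instance (rows : Int) (cols : Int) (grid : List (List Int)) : Decidable (Pre_has_isolated_empty_cell rows cols grid) := by unfold Pre_has_isolated_empty_cell; infer_instance

def pvWitness_has_isolated_empty_cell : Int × Int × List (List Int) := (2, 2, [[-1, 0], [0, 0]])

def Spec_has_isolated_empty_cell (rows : Int) (cols : Int) (grid : List (List Int)) (out : Bool) : Prop := out = has_isolated_empty_cell_alt rows cols grid
instance (rows : Int) (cols : Int) (grid : List (List Int)) (out : Bool) : Decidable (Spec_has_isolated_empty_cell rows cols grid out) := by unfold Spec_has_isolated_empty_cell; infer_instance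

-- ===== CLAIM (what is proved, stated in full; the proofs are below) =====
def Claim_equal_has_isolated_empty_cell : Prop := ∀ (rows : Int) (cols : Int) (grid : List (List Int)), Dom_has_isolated_empty_cell rows cols grid → Pre_has_isolated_empty_cell rows cols grid → Spec_has_isolated_empty_cell rows cols grid (has_isolated_empty_cell rows cols grid)

-- ===== LEMMAS AND PROOFS =====

-- what one pvMarkCell step adds for pair p
def pvAdds (rows cols : Int) (grid : List (List Int)) (r c : Int) (p : Int × Int) : Prop :=
  pvCell grid r c = -1 ∧
    ((r + 1 < rows ∧ pvCell grid (r + 1) c = -1 ∧ (p = (r, c) ∨ p = (r + 1, c))) ∨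
     (c + 1 < cols ∧ pvCell grid r (c + 1) = -1 ∧ (p = (r, c) ∨ p = (r, c + 1))))

theorem mem_pvMarkCell {rows cols : Int} {grid : List (List Int)} {r c : Int}
    {m : PySem.Set (Int × Int)} {p : Int × Int} :
    p ∈ pvMarkCell rows cols grid r m c ↔ p ∈ m ∨ pvAdds rows cols grid r c p := by
  unfold pvMarkCell pvAdds
  split_ifs <;> (try simp only [PySem.Set.mem_add]) <;> tauto

-- generic: membership after a foldl whose step only adds elements
theorem mem_foldl_adds {α β : Type} {f : PySem.Set β → α → PySem.Set β}
    {Q : α → β → Prop}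
    (hf : ∀ m x p, p ∈ f m x ↔ p ∈ m ∨ Q x p) :
    ∀ (l : List α) (s : PySem.Set β) (p : β),
      p ∈ l.foldl f s ↔ p ∈ s ∨ ∃ x ∈ l, Q x p := by
  intro l
  induction l with
  | nil => simp
  | cons a t ih =>
    intro s p
    simp only [List.foldl_cons, ih, hf, List.mem_cons]
    constructor
    · rintro ((h | h) | ⟨x, hx, hq⟩)
      · exact Or.inl h
      · exact Or.inr ⟨a, Or.inl rfl, h⟩
      · exact Or.inr ⟨x, Or.inr hx, hq⟩
    · rintro (h | ⟨x, (rfl | hx), hq⟩)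
      · exact Or.inl (Or.inl h)
      · exact Or.inl (Or.inr hq)
      · exact Or.inr ⟨x, hx, hq⟩

theorem mem_pvMarked {rows cols : Int} {grid : List (List Int)} {p : Int × Int} :
    p ∈ pvMarked rows cols grid ↔
      ∃ r, (0 ≤ r ∧ r < rows) ∧ ∃ c, (0 ≤ c ∧ c < cols) ∧ pvAdds rows cols grid r c p := by
  unfold pvMarked
  rw [mem_foldl_adds (Q := fun r p => ∃ c ∈ PySem.List.pyRange 0 cols 1, pvAdds rows cols grid r c p)
      (fun m r p => mem_foldl_adds (Q := fun c p => pvAdds rows cols grid r c p)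
        (fun m c p => mem_pvMarkCell) _ m p)]
  simp [PySem.List.mem_pyRange_one, PySem.Set.empty]

-- the four neighbour conditions A tests
def pvNbr (rows cols : Int) (grid : List (List Int)) (row col dr dc : Int) : Prop :=
  0 ≤ row + dr ∧ row + dr < rows ∧ 0 ≤ col + dc ∧ col + dc < cols ∧
    pvCell grid (row + dr) (col + dc) = -1

set_option maxHeartbeats 1000000 in
theorem deg_eq_zero_iff {rows cols : Int} {grid : List (List Int)} {row col : Int} :
    pvDeg rows cols grid row col = 0 ↔
      ¬ pvNbr rows cols grid row col 1 0 ∧ ¬ pvNbr rows cols grid row col (-1) 0 ∧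
      ¬ pvNbr rows cols grid row col 0 1 ∧ ¬ pvNbr rows cols grid row col 0 (-1) := by
  simp only [pvDeg, pvNbr, List.foldl_cons, List.foldl_nil]
  split_ifs <;> simp_all

theorem marked_iff {rows cols : Int} {grid : List (List Int)} {row col : Int}
    (hr : 0 ≤ row ∧ row < rows) (hc : 0 ≤ col ∧ col < cols)
    (he : pvCell grid row col = -1) :
    (row, col) ∈ pvMarked rows cols grid ↔
      pvNbr rows cols grid row col 1 0 ∨ pvNbr rows cols grid row col (-1) 0 ∨
      pvNbr rows cols grid row col 0 1 ∨ pvNbr rows cols grid row col 0 (-1) := by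
  rw [mem_pvMarked]
  constructor
  · rintro ⟨r, hrr, c, hcc, hcell, hbr⟩
    rcases hbr with ⟨hlt, hne, (hp | hp)⟩ | ⟨hlt, hne, (hp | hp)⟩ <;>
      rw [Prod.mk.injEq] at hp <;> obtain ⟨h1, h2⟩ := hp
    · -- p = (r, c), down pair: down neighbour of (row, col)
      refine Or.inl ⟨by omega, by omega, by omega, by omega, ?_⟩
      have e1 : row + 1 = r + 1 := by omega
      have e2 : col + 0 = c := by omega
      rw [e1, e2]; exact hne
    · -- p = (r + 1, c): up neighbour of (row, col) is (r, c), empty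
      refine Or.inr (Or.inl ⟨by omega, by omega, by omega, by omega, ?_⟩)
      have e1 : row + -1 = r := by omega
      have e2 : col + 0 = c := by omega
      rw [e1, e2]; exact hcell
    · -- p = (r, c), right pair: right neighbour of (row, col)
      refine Or.inr (Or.inr (Or.inl ⟨by omega, by omega, by omega, by omega, ?_⟩))
      have e1 : row + 0 = r := by omega
      have e2 : col + 1 = c + 1 := by omega
      rw [e1, e2]; exact hne
    · -- p = (r, c + 1): left neighbour of (row, col) is (r, c), empty
      refine Or.inr (Or.inr (Or.inr ⟨by omega, by omega, by omega, by omega, ?_⟩))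
      have e1 : row + 0 = r := by omega
      have e2 : col + -1 = c := by omega
      rw [e1, e2]; exact hcell
  · rintro (h | h | h | h) <;> obtain ⟨hn1, hn2, hn3, hn4, hne⟩ := h
    · -- down neighbour empty: event at (row, col), down branch, p = (row, col)
      refine ⟨row, hr, col, hc, he, Or.inl ⟨hn2, ?_, Or.inl rfl⟩⟩
      have e : col + 0 = col := by omega
      rw [e] at hne; exact hne
    · -- up neighbour empty: event at (row + -1, col), down branch, p = its down cell
      refine ⟨row + -1, ⟨hn1, by omega⟩, col, hc, ?_, Or.inl ⟨by omega, ?_, Or.inr ?_⟩⟩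
      · have e : col + 0 = col := by omega
        rw [e] at hne; exact hne
      · have e : row + -1 + 1 = row := by omega
        rw [e]; exact he
      · rw [Prod.mk.injEq]; exact ⟨by omega, rfl⟩
    · -- right neighbour empty: event at (row, col), right branch, p = (row, col)
      refine ⟨row, hr, col, hc, he, Or.inr ⟨hn4, ?_, Or.inl rfl⟩⟩
      have e : row + 0 = row := by omega
      rw [e] at hne; exact hne
    · -- left neighbour empty: event at (row, col + -1), right branch, p = its right cell
      refine ⟨row, hr, col + -1, ⟨hn3, by omega⟩, ?_, Or.inr ⟨by omega, ?_, Or.inr ?_⟩⟩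
      · have e : row + 0 = row := by omega
        rw [e] at hne; exact hne
      · have e : col + -1 + 1 = col := by omega
        rw [e]; exact he
      · rw [Prod.mk.injEq]; exact ⟨rfl, by omega⟩

-- ===== VERDICT (by name: the statement is the Claim_ definition above) =====
theorem has_isolated_empty_cell_spec : Claim_equal_has_isolated_empty_cell := by
  intro rows cols grid _ _
  unfold Spec_has_isolated_empty_cell has_isolated_empty_cell has_isolated_empty_cell_alt
  refine PySem.List.any_congr_mem fun row hrow => PySem.List.any_congr_mem fun col hcol => ?_
  rw [PySem.List.mem_pyRange_one] at hrow hcol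
  by_cases he : pvCell grid row col = -1
  · simp only [he, ne_eq, not_true_eq_false, if_false, decide_true, Bool.true_and]
    have key : pvDeg rows cols grid row col = 0 ↔ (row, col) ∉ pvMarked rows cols grid := by
      rw [deg_eq_zero_iff, marked_iff hrow hcol he]; tauto
    rw [Bool.eq_iff_iff, decide_eq_true_iff, key]
    simp only [← PySem.Set.contains_iff]
    simp
  · simp [he]
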